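-- pv_equiv track=rewrite | github.com/MOHIT-M-PATEL/AI | AIL Assignment 3 (Water jug BFS DFS)/water_jugs_dfs.py | dfs
-- ===== SOURCE A (Python) =====
-- def dfs(capacity_x, capacity_y, target):
--     stack = [(0, 0)]
--     visited = set()
--     path = []
--
--     while stack:
--         x, y = stack.pop()
--         if (x, y) in visited:
--             continue
--
--         visited.add((x, y))
--         path.append((x, y))
--
--         if x == target or y == target:
--             return path
--
--         moves = [
--             (capacity_x, y), (x, capacity_y), (0, y), (x, 0),
--             (x - min(x, capacity_y - y), y + min(x, capacity_y - y)),
--             (x + min(y, capacity_x - x), y - min(y, capacity_x - x))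
--         ]
--
--         for move in moves:
--             if move not in visited:
--                 stack.append(move)
--     return None
-- ===== SOURCE B (Python) =====
-- def dfs(capacity_x, capacity_y, target):
--     visited = {(0, 0)}
--     path = [(0, 0)]
--     if 0 == target:
--         return path
--     frames = []          # suspended parent frames: (x, y, next-candidate-index)
--     fx = fy = fi = 0     # the current frame, kept unpacked in locals
--     while True:
--         if fi == 6:      # current frame exhausted: backtrack
--             if not frames:
--                 return None
--             fx, fy, fi = frames.pop()
--             continue
--         i = fi
--         fi = i + 1
--         # the i-th candidate successor of (fx, fy), in exploration order
--         # (pour y->x, pour x->y, empty y, empty x, fill y, fill x);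
--         # successors are computed one at a time and never stored
--         if i == 0:
--             d = fy if fy < capacity_x - fx else capacity_x - fx
--             probe = (fx + d, fy - d)
--         elif i == 1:
--             d = fx if fx < capacity_y - fy else capacity_y - fy
--             probe = (fx - d, fy + d)
--         elif i == 2:
--             probe = (fx, 0)
--         elif i == 3:
--             probe = (0, fy)
--         elif i == 4:
--             probe = (fx, capacity_y)
--         else:
--             probe = (capacity_x, fy)
--         if probe in visited:
--             continue
--         visited.add(probe)
--         path.append(probe)
--         x, y = probe
--         if x == target or y == target:
--             return path
--         frames.append((fx, fy, fi))
--         fx, fy, fi = x, y, 0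
-- ===== Notes on version B (the rewrite author's own statement) =====
-- stated objective: alternative
-- what changed: A runs DFS over a flat stack of states, eagerly building all six successors per node into a list and filtering them against visited at push time; B is a cursor-based backtracking machine: the current frame (state plus next-candidate index) is kept in locals, suspended parents sit on a trail, successors are computed one at a time by an indexed if-chain and never stored or pre-filtered (one membership check per proposed candidate), and backtracking happens by cursor exhaustion.
import Mathlib
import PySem

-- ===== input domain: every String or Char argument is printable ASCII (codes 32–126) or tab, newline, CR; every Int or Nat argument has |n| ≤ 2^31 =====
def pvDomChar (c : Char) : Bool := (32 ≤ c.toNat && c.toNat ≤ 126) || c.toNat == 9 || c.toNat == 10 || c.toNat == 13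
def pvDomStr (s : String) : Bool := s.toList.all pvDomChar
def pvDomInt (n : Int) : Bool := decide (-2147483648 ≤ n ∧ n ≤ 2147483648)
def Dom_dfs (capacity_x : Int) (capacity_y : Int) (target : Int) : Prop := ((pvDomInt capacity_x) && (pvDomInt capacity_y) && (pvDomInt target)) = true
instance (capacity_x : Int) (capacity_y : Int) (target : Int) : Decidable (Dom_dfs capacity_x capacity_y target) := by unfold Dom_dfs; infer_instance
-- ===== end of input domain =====

-- B replaces A's DFS over a flat stack of eagerly built, push-time-filtered successor lists by a
-- cursor-based backtracking machine: a trail of (state, next-candidate-index) frames, successors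
-- computed one at a time by an indexed move function and never stored (objective: alternative).

-- ===== PORT A =====
-- the six moves, in the order of A's `moves` list
def pvMoves (capacity_x capacity_y x y : Int) : List (Int × Int) :=
  [(capacity_x, y), (x, capacity_y), (0, y), (x, 0),
   (x - min x (capacity_y - y), y + min x (capacity_y - y)),
   (x + min y (capacity_x - x), y - min y (capacity_x - x))]

-- shared totality device for both ports: a fueled runner for a loop written as a step
-- function over its state (left = the loop returned, right = still running); pvRun k runs up
-- to 2^k steps with recursion depth k, so large fuels evaluate without deep recursion
def pvRun {α : Type} (step : α → α) (fin : α → Bool) : Nat → α → α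
  | 0, s => if fin s then s else step s
  | k + 1, s => if fin s then s else pvRun step fin k (pvRun step fin k s)

-- one iteration of A's `while stack:` loop body; the Lean stack keeps its head as Python's
-- list end (the pop site). `visited` is queried for membership only, so Python's set is
-- carried as a Std.HashSet (contains/insert follow Python's `in`/`add`); `path` is accumulated
-- head-first and reversed where Python returns it (Python appends at the list end). The Nat in
-- the running state is the remaining fuel; exhaustion yields the `none` result.
def pvStepA (cx cy t : Int) :
    Sum (Option (List (Int × Int)) × Std.HashSet (Int × Int) × List (Int × Int))
      (Nat × List (Int × Int) × Std.HashSet (Int × Int) × List (Int × Int)) →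
    Sum (Option (List (Int × Int)) × Std.HashSet (Int × Int) × List (Int × Int))
      (Nat × List (Int × Int) × Std.HashSet (Int × Int) × List (Int × Int))
  | .inl r => .inl r
  | .inr (fuel, stack, visited, path) =>
    match stack, fuel with
    | [], _ => .inl (none, visited, path)
    | _ :: _, 0 => .inl (none, visited, path)
    | (x, y) :: rest, fuel + 1 =>
      if visited.contains (x, y) then .inr (fuel, rest, visited, path)
      else
        let visited' := visited.insert (x, y)
        let path' := (x, y) :: path
        if x = t ∨ y = t then .inl (some path'.reverse, visited', path')
        else .inr (fuel,
          (pvMoves cx cy x y).foldl (fun st m => if visited'.contains m then st else m :: st) rest,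
          visited', path')

def pvSizeU (cx cy : Int) : Nat := (cx + 1).toNat * (cy + 1).toNat

def dfs (capacity_x : Int) (capacity_y : Int) (target : Int) : Option (List (Int × Int)) :=
  match pvRun (pvStepA capacity_x capacity_y target) (fun s => s.isLeft)
      (Nat.log2 (6 * pvSizeU capacity_x capacity_y + 1 + 1) + 1)
      (.inr (6 * pvSizeU capacity_x capacity_y + 1, [(0, 0)], ∅, [])) with
  | .inl (res, _, _) => res
  | .inr _ => none

-- ===== PORT B =====
-- Source B's `move(x, y, i)`: the i-th candidate successor, in exploration order
def pvMove (cx cy x y : Int) : Nat → Int × Int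
  | 0 => let d := min y (cx - x); (x + d, y - d)
  | 1 => let d := min x (cy - y); (x - d, y + d)
  | 2 => (x, 0)
  | 3 => (0, y)
  | 4 => (x, cy)
  | _ => (cx, y)

-- one iteration of Source B's `while True:` loop body: the current frame (fx, fy) with its
-- next-candidate index fi kept unpacked, a trail of suspended parent frames, the candidate
-- computed by the if-chain (as pvMove) and never stored; visited/path carried as in port A
-- (path head-first, reversed where Python returns it). The Nat in the running state is the
-- remaining fuel (a totality device; exhaustion = the `none` result).
def pvStepB (cx cy t : Int) :
    Sum (Option (List (Int × Int)) × Std.HashSet (Int × Int) × List (Int × Int))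
      (Nat × Int × Int × Nat × List (Int × Int × Nat) ×
        Std.HashSet (Int × Int) × List (Int × Int)) →
    Sum (Option (List (Int × Int)) × Std.HashSet (Int × Int) × List (Int × Int))
      (Nat × Int × Int × Nat × List (Int × Int × Nat) ×
        Std.HashSet (Int × Int) × List (Int × Int))
  | .inl r => .inl r
  | .inr (fuel, fx, fy, fi, frames, visited, path) =>
    match fuel with
    | 0 => .inl (none, visited, path)
    | fuel + 1 =>
      if fi = 6 then
        match frames with
        | [] => .inl (none, visited, path)
        | (x, y, i) :: fs => .inr (fuel, x, y, i, fs, visited, path)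
      else
        let probe := pvMove cx cy fx fy fi
        if visited.contains probe then .inr (fuel, fx, fy, fi + 1, frames, visited, path)
        else
          let visited' := visited.insert probe
          let path' := probe :: path
          if probe.1 = t ∨ probe.2 = t then .inl (some path'.reverse, visited', path')
          else .inr (fuel, probe.1, probe.2, 0, (fx, fy, fi + 1) :: frames, visited', path')

def dfs_alt (capacity_x : Int) (capacity_y : Int) (target : Int) : Option (List (Int × Int)) :=
  if (0 : Int) = target then some [(0, 0)]
  else
    match pvRun (pvStepB capacity_x capacity_y target) (fun s => s.isLeft)
        (Nat.log2 (7 * pvSizeU capacity_x capacity_y + 8 + 1) + 1)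
        (.inr (7 * pvSizeU capacity_x capacity_y + 8, 0, 0, 0, [],
          Std.HashSet.insert ∅ (0, 0), [(0, 0)])) with
    | .inl (res, _, _) => res
    | .inr _ => none

-- ===== PRECONDITION & SPEC =====
-- Pre_ excludes negative capacities (except the trivial target 0), where the state space is infinite and A
-- diverges on most inputs; on the negative-capacity inputs where A happens to reach the target and return,
-- B returns the same value, but termination there is accidental and not claimed.
def Pre_dfs (capacity_x : Int) (capacity_y : Int) (target : Int) : Prop :=
  (0 ≤ capacity_x ∧ 0 ≤ capacity_y) ∨ target = 0
instance (capacity_x : Int) (capacity_y : Int) (target : Int) : Decidable (Pre_dfs capacity_x capacity_y target) := by unfold Pre_dfs; infer_instance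
def pvWitness_dfs : Int × Int × Int := (4, 3, 2)
def Spec_dfs (capacity_x : Int) (capacity_y : Int) (target : Int) (out : Option (List (Int × Int))) : Prop := out = dfs_alt capacity_x capacity_y target
instance (capacity_x : Int) (capacity_y : Int) (target : Int) (out : Option (List (Int × Int))) : Decidable (Spec_dfs capacity_x capacity_y target out) := by unfold Spec_dfs; infer_instance

-- ===== CLAIM (what is proved, stated in full; the proofs are below) =====
def Claim_equal_dfs : Prop := ∀ (capacity_x : Int) (capacity_y : Int) (target : Int), Dom_dfs capacity_x capacity_y target → Pre_dfs capacity_x capacity_y target → Spec_dfs capacity_x capacity_y target (dfs capacity_x capacity_y target)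

-- ===== LEMMAS AND PROOFS =====

-- linear fuel iteration of a step function, and the runner's equivalence to it
def pvIter {α : Type} (step : α → α) (fin : α → Bool) : Nat → α → α
  | 0, s => s
  | n + 1, s => if fin s then s else pvIter step fin n (step s)

theorem pvIter_fin {α : Type} (step : α → α) (fin : α → Bool) (s : α) (h : fin s = true) :
    ∀ n, pvIter step fin n s = s := by
  intro n
  cases n <;> simp [pvIter, h]

theorem pvIter_add {α : Type} (step : α → α) (fin : α → Bool) :
    ∀ (n m : Nat) (s : α), pvIter step fin (n + m) s = pvIter step fin m (pvIter step fin n s) := by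
  intro n
  induction n with
  | zero =>
    intro m s
    simp [pvIter]
  | succ n ih =>
    intro m s
    by_cases h : fin s = true
    · simp [pvIter_fin step fin s h]
    · rw [show n + 1 + m = (n + m) + 1 from by omega]
      rw [show pvIter step fin ((n + m) + 1) s = pvIter step fin (n + m) (step s) from by
        simp [pvIter, h]]
      rw [ih]
      congr 1
      simp [pvIter, h]

theorem pvRun_eq {α : Type} (step : α → α) (fin : α → Bool) :
    ∀ (k : Nat) (s : α), pvRun step fin k s = pvIter step fin (2 ^ k) s := by
  intro k
  induction k with
  | zero =>
    intro s
    by_cases h : fin s = true <;> simp [pvRun, pvIter, h]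
  | succ k ih =>
    intro s
    by_cases h : fin s = true
    · simp [pvRun, pvIter_fin step fin s h, h]
    · rw [show pvRun step fin (k + 1) s = pvRun step fin k (pvRun step fin k s) from by
        simp [pvRun, h]]
      rw [ih, ih, ← pvIter_add]
      congr 1
      rw [pow_succ]
      omega

theorem pvIter_hit {α : Type} (step : α → α) (fin : α → Bool) (s : α)
    (h : fin s = false) (hs : fin (step s) = true) :
    ∀ N, 1 ≤ N → pvIter step fin N s = step s := by
  intro N hN
  match N with
  | M + 1 =>
    rw [show pvIter step fin (M + 1) s = pvIter step fin M (step s) from by simp [pvIter, h]]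
    exact pvIter_fin step fin (step s) hs M

theorem pvTwoPow_ge (n : Nat) : n + 1 ≤ 2 ^ (Nat.log2 (n + 1) + 1) :=
  le_of_lt ((Nat.log2_lt (by omega)).mp (Nat.lt_succ_self _))

-- A's whole `while stack:` loop as a linear fueled recursion (proof-side restatement of
-- iterating pvStepA; `none` = fuel ran out)
def pvLoopA (cx cy t : Int) : List (Int × Int) → Std.HashSet (Int × Int) → List (Int × Int) → Nat →
    Option (Option (List (Int × Int)) × Std.HashSet (Int × Int) × List (Int × Int) × Nat)
  | [], visited, path, fuel => some (none, visited, path, fuel)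
  | _ :: _, _, _, 0 => none
  | (x, y) :: rest, visited, path, fuel + 1 =>
    if visited.contains (x, y) then pvLoopA cx cy t rest visited path fuel
    else
      let visited' := visited.insert (x, y)
      let path' := (x, y) :: path
      if x = t ∨ y = t then some (some path'.reverse, visited', path', fuel)
      else pvLoopA cx cy t
        ((pvMoves cx cy x y).foldl (fun st m => if visited'.contains m then st else m :: st) rest)
        visited' path' fuel

-- B's whole machine as a linear fueled recursion (proof-side restatement of iterating pvStepB)
def pvLoopB3 (cx cy t : Int) : Nat → Int → Int → Nat → List (Int × Int × Nat) →
    Std.HashSet (Int × Int) → List (Int × Int) →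
    Option (Option (List (Int × Int)) × Std.HashSet (Int × Int) × List (Int × Int))
  | 0, _, _, _, _, _, _ => none
  | fuel + 1, fx, fy, fi, frames, v, p =>
    if fi = 6 then
      match frames with
      | [] => some (none, v, p)
      | (x, y, i) :: fs => pvLoopB3 cx cy t fuel x y i fs v p
    else
      let probe := pvMove cx cy fx fy fi
      if v.contains probe then pvLoopB3 cx cy t fuel fx fy (fi + 1) frames v p
      else
        let v' := v.insert probe
        let p' := probe :: p
        if probe.1 = t ∨ probe.2 = t then some (some p'.reverse, v', p')
        else pvLoopB3 cx cy t fuel probe.1 probe.2 0 ((fx, fy, fi + 1) :: frames) v' p'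

-- a returning linear run of A is what iterating pvStepA computes
theorem pvIterA_of_some (cx cy t : Int) : ∀ (N : Nat) (f : Nat) (stack : List (Int × Int))
    (v : Std.HashSet (Int × Int)) (p : List (Int × Int)) res w q f',
    pvLoopA cx cy t stack v p f = some (res, w, q, f') → f + 1 ≤ N →
    pvIter (pvStepA cx cy t) (fun s => s.isLeft) N (.inr (f, stack, v, p)) = .inl (res, w, q) := by
  intro N
  induction N with
  | zero =>
    intro f stack v p res w q f' _ hle
    omega
  | succ N ih =>
    intro f stack v p res w q f' hL hle
    rw [show pvIter (pvStepA cx cy t) (fun s => s.isLeft) (N + 1) (.inr (f, stack, v, p))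
        = pvIter (pvStepA cx cy t) (fun s => s.isLeft) N
            (pvStepA cx cy t (.inr (f, stack, v, p))) from by simp [pvIter]]
    cases stack with
    | nil =>
      simp only [pvLoopA, Option.some.injEq, Prod.mk.injEq] at hL
      obtain ⟨rfl, rfl, rfl, rfl⟩ := hL
      rw [show pvStepA cx cy t (.inr (f, [], v, p)) = .inl (none, v, p) from by
        cases f <;> rfl]
      exact pvIter_fin _ _ _ rfl N
    | cons hd rest =>
      obtain ⟨x, y⟩ := hd
      match f with
      | 0 => simp [pvLoopA] at hL
      | g + 1 =>
        by_cases hv : v.contains (x, y) = true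
        · simp only [pvLoopA, if_pos hv] at hL
          rw [show pvStepA cx cy t (.inr (g + 1, (x, y) :: rest, v, p))
              = .inr (g, rest, v, p) from by simp [pvStepA, hv]]
          exact ih g rest v p res w q f' hL (by omega)
        · simp only [pvLoopA, if_neg hv] at hL
          by_cases ht : x = t ∨ y = t
          · simp only [if_pos ht, Option.some.injEq, Prod.mk.injEq] at hL
            obtain ⟨rfl, rfl, rfl, rfl⟩ := hL
            rw [show pvStepA cx cy t (.inr (g + 1, (x, y) :: rest, v, p))
                = .inl (some ((x, y) :: p).reverse, v.insert (x, y), (x, y) :: p) from by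
              simp [pvStepA, hv, ht]]
            exact pvIter_fin _ _ _ rfl N
          · simp only [if_neg ht] at hL
            rw [show pvStepA cx cy t (.inr (g + 1, (x, y) :: rest, v, p))
                = .inr (g, (pvMoves cx cy x y).foldl
                    (fun st m => if (v.insert (x, y)).contains m then st else m :: st) rest,
                  v.insert (x, y), (x, y) :: p) from by simp [pvStepA, hv, ht]]
            exact ih g _ _ _ res w q f' hL (by omega)

-- a returning linear run of B's machine is what iterating pvStepB computes
theorem pvIterB3_of_some (cx cy t : Int) : ∀ (N : Nat) (f : Nat) (fx fy : Int) (fi : Nat)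
    (frames : List (Int × Int × Nat)) (v : Std.HashSet (Int × Int)) (p : List (Int × Int)) out,
    pvLoopB3 cx cy t f fx fy fi frames v p = some out → f + 1 ≤ N →
    pvIter (pvStepB cx cy t) (fun s => s.isLeft) N (.inr (f, fx, fy, fi, frames, v, p))
      = .inl out := by
  intro N
  induction N with
  | zero =>
    intro f fx fy fi frames v p out _ hle
    omega
  | succ N ih =>
    intro f fx fy fi frames v p out hL hle
    rw [show pvIter (pvStepB cx cy t) (fun s => s.isLeft) (N + 1)
          (.inr (f, fx, fy, fi, frames, v, p))
        = pvIter (pvStepB cx cy t) (fun s => s.isLeft) N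
            (pvStepB cx cy t (.inr (f, fx, fy, fi, frames, v, p))) from by simp [pvIter]]
    match f with
    | 0 => simp [pvLoopB3] at hL
    | g + 1 =>
      by_cases h6 : fi = 6
      · subst h6
        cases frames with
        | nil =>
          simp only [pvLoopB3, reduceIte, Option.some.injEq] at hL
          rw [show pvStepB cx cy t (.inr (g + 1, fx, fy, 6, [], v, p))
              = .inl (none, v, p) from rfl, hL]
          exact pvIter_fin _ _ _ rfl N
        | cons fr fs =>
          obtain ⟨x, y, i⟩ := fr
          simp only [pvLoopB3, reduceIte] at hL
          rw [show pvStepB cx cy t (.inr (g + 1, fx, fy, 6, (x, y, i) :: fs, v, p))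
              = .inr (g, x, y, i, fs, v, p) from rfl]
          exact ih g x y i fs v p out hL (by omega)
      · by_cases hv : v.contains (pvMove cx cy fx fy fi) = true
        · simp only [pvLoopB3, if_neg h6, if_pos hv] at hL
          rw [show pvStepB cx cy t (.inr (g + 1, fx, fy, fi, frames, v, p))
              = .inr (g, fx, fy, fi + 1, frames, v, p) from by simp [pvStepB, h6, hv]]
          exact ih g fx fy (fi + 1) frames v p out hL (by omega)
        · simp only [pvLoopB3, if_neg h6, if_neg hv] at hL
          by_cases ht : (pvMove cx cy fx fy fi).1 = t ∨ (pvMove cx cy fx fy fi).2 = t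
          · simp only [if_pos ht, Option.some.injEq] at hL
            rw [show pvStepB cx cy t (.inr (g + 1, fx, fy, fi, frames, v, p))
                = .inl (some ((pvMove cx cy fx fy fi) :: p).reverse,
                    v.insert (pvMove cx cy fx fy fi), (pvMove cx cy fx fy fi) :: p) from by
              simp [pvStepB, h6, hv, ht], hL]
            exact pvIter_fin _ _ _ rfl N
          · simp only [if_neg ht] at hL
            rw [show pvStepB cx cy t (.inr (g + 1, fx, fy, fi, frames, v, p))
                = .inr (g, (pvMove cx cy fx fy fi).1, (pvMove cx cy fx fy fi).2, 0,
                    (fx, fy, fi + 1) :: frames, v.insert (pvMove cx cy fx fy fi),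
                    (pvMove cx cy fx fy fi) :: p) from by simp [pvStepB, h6, hv, ht]]
            exact ih g _ _ 0 _ _ _ out hL (by omega)

-- A's `for move in moves` push loop-- A's `for move in moves` push loop builds the filtered reversal on top of the rest of the stack
theorem pvPush_eq (l : List (Int × Int)) (v : Std.HashSet (Int × Int)) (rest : List (Int × Int)) :
    l.foldl (fun st m => if v.contains m then st else m :: st) rest
      = l.reverse.filter (fun m => !v.contains m) ++ rest := by
  induction l generalizing rest with
  | nil => simp
  | cons m l ih =>
    rw [List.foldl_cons, List.reverse_cons, List.filter_append, List.append_assoc]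
    cases hm : v.contains m
    · rw [if_neg (by simp), ih]
      simp [hm]
    · rw [if_pos rfl, ih]
      simp [hm]

theorem pvContains_insert_self (v : Std.HashSet (Int × Int)) (m : Int × Int) :
    (v.insert m).contains m = true := by
  simp [Std.HashSet.contains_insert]

theorem pvContains_insert_mono (v : Std.HashSet (Int × Int)) (a m : Int × Int)
    (h : v.contains m = true) : (v.insert a).contains m = true := by
  simp [Std.HashSet.contains_insert, h]

-- B's reversed exploration order, one candidate at a time
theorem pvRevMoves (cx cy x y : Int) :
    (pvMoves cx cy x y).reverse
      = [pvMove cx cy x y 0, pvMove cx cy x y 1, pvMove cx cy x y 2,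
         pvMove cx cy x y 3, pvMove cx cy x y 4, pvMove cx cy x y 5] := by
  simp [pvMoves, pvMove]

theorem pvDrop_succ (cx cy x y : Int) (i : Nat) (hi : i < 6) :
    ((pvMoves cx cy x y).reverse).drop i
      = pvMove cx cy x y i :: ((pvMoves cx cy x y).reverse).drop (i + 1) := by
  rw [pvRevMoves]
  match i, hi with
  | 0, _ => rfl
  | 1, _ => rfl
  | 2, _ => rfl
  | 3, _ => rfl
  | 4, _ => rfl
  | 5, _ => rfl

theorem pvDrop_six (cx cy x y : Int) :
    ((pvMoves cx cy x y).reverse).drop 6 = [] := by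
  rw [pvRevMoves]
  rfl

theorem pvMove_mem (cx cy x y : Int) (i : Nat) (hi : i < 6) :
    pvMove cx cy x y i ∈ pvMoves cx cy x y := by
  have : pvMove cx cy x y i ∈ (pvMoves cx cy x y).reverse := by
    rw [pvRevMoves]
    match i, hi with
    | 0, _ => simp
    | 1, _ => simp
    | 2, _ => simp
    | 3, _ => simp
    | 4, _ => simp
    | 5, _ => simp
  rwa [List.mem_reverse] at this

-- the simulation invariant: A's stack decomposes into the machine's frames, each frame
-- contributing its not-yet-proposed candidates filtered by the visited set u it was pushed
-- under (a subset of the current visited set)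
inductive pvRelF (cx cy : Int) (v : Std.HashSet (Int × Int)) :
    List (Int × Int × Nat) → List (Int × Int) → Prop
  | nil : pvRelF cx cy v [] []
  | cons (x y : Int) (i : Nat) (u : Std.HashSet (Int × Int))
      (fs : List (Int × Int × Nat)) (s : List (Int × Int)) :
      i ≤ 6 →
      (∀ m, u.contains m = true → v.contains m = true) →
      pvRelF cx cy v fs s →
      pvRelF cx cy v ((x, y, i) :: fs)
        ((((pvMoves cx cy x y).reverse.drop i).filter (fun m => !u.contains m)) ++ s)

theorem pvRelF_mono (cx cy : Int) {v v' : Std.HashSet (Int × Int)}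
    (hv : ∀ m, v.contains m = true → v'.contains m = true)
    {fs : List (Int × Int × Nat)} {s : List (Int × Int)}
    (h : pvRelF cx cy v fs s) : pvRelF cx cy v' fs s := by
  induction h with
  | nil => exact pvRelF.nil
  | cons x y i u fs s hi hu _ ih =>
    exact pvRelF.cons x y i u fs s hi (fun m hm => hv m (hu m hm)) ih

theorem pvRelF_nil_inv (cx cy : Int) (v : Std.HashSet (Int × Int)) (s : List (Int × Int))
    (h : pvRelF cx cy v [] s) : s = [] := by
  cases h
  rfl

-- the bridge: a returning run of B's machine reproduces a returning run of A on the stack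
-- related to the current frame consed onto the suspended trail
theorem pvBridge3 (cx cy t : Int) : ∀ (fB : Nat) (fx fy : Int) (fi : Nat)
    (frames : List (Int × Int × Nat)) (v : Std.HashSet (Int × Int))
    (p s : List (Int × Int)) (fA : Nat) res w q f' out,
    pvRelF cx cy v ((fx, fy, fi) :: frames) s →
    pvLoopA cx cy t s v p fA = some (res, w, q, f') →
    pvLoopB3 cx cy t fB fx fy fi frames v p = some out → out = (res, w, q) := by
  intro fB
  induction fB with
  | zero =>
    intro fx fy fi frames v p s fA res w q f' out _ _ hM
    simp [pvLoopB3] at hM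
  | succ f ih =>
    intro fx fy fi frames v p s fA res w q f' out hrel hA hM
    cases hrel with
    | cons _ _ _ u _ s' hfi hu hrest =>
      by_cases h6 : fi = 6
      · subst h6
        have hnil : (((pvMoves cx cy fx fy).reverse.drop 6).filter (fun m => !u.contains m))
            = [] := by
          rw [pvDrop_six]
          rfl
        rw [hnil, List.nil_append] at hA
        simp only [pvLoopB3, reduceIte] at hM
        cases frames with
        | nil =>
          have hs : s' = [] := pvRelF_nil_inv cx cy v s' hrest
          subst hs
          simp only [pvLoopA, Option.some.injEq, Prod.mk.injEq] at hA
          obtain ⟨rfl, rfl, rfl, rfl⟩ := hA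
          simp only [Option.some.injEq] at hM
          exact hM.symm
        | cons fr fs =>
          obtain ⟨x, y, i⟩ := fr
          exact ih x y i fs v p s' fA res w q f' out hrest hA hM
      · have hlt : fi < 6 := by omega
        have hdec := pvDrop_succ cx cy fx fy fi hlt
        simp only [pvLoopB3, if_neg h6] at hM
        by_cases hv : v.contains (pvMove cx cy fx fy fi) = true
        · rw [if_pos hv] at hM
          -- A skips the candidate (absent from its stack, or popped and discarded)
          have hA' : ∃ fA'', pvLoopA cx cy t
              ((((pvMoves cx cy fx fy).reverse.drop (fi + 1)).filter
                  (fun m => !u.contains m)) ++ s') v p fA'' = some (res, w, q, f') := by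
            by_cases huc : u.contains (pvMove cx cy fx fy fi) = true
            · rw [hdec, List.filter_cons, if_neg (by simp [huc])] at hA
              exact ⟨fA, hA⟩
            · rw [hdec, List.filter_cons, if_pos (by simp [huc]), List.cons_append] at hA
              rcases hc : pvMove cx cy fx fy fi with ⟨c1, c2⟩
              rw [hc] at hA hv
              match fA with
              | 0 => simp [pvLoopA] at hA
              | fa + 1 =>
                simp only [pvLoopA, if_pos hv] at hA
                exact ⟨fa, hA⟩
          obtain ⟨fA'', hA''⟩ := hA'
          exact ih fx fy (fi + 1) frames v p _ fA'' res w q f' out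
            (pvRelF.cons fx fy (fi + 1) u frames s' (by omega) hu hrest) hA'' hM
        · have huc : u.contains (pvMove cx cy fx fy fi) = false := by
            cases h : u.contains (pvMove cx cy fx fy fi)
            · rfl
            · exact absurd (hu _ h) hv
          rw [hdec, List.filter_cons, if_pos (by simp [huc]), List.cons_append] at hA
          rw [if_neg hv] at hM
          rcases hc : pvMove cx cy fx fy fi with ⟨c1, c2⟩
          rw [hc] at hA hv hM
          match fA with
          | 0 => simp [pvLoopA] at hA
          | fa + 1 =>
            simp only [pvLoopA, if_neg hv] at hA
            by_cases ht : c1 = t ∨ c2 = t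
            · simp only [if_pos ht, Option.some.injEq, Prod.mk.injEq] at hA hM
              obtain ⟨rfl, rfl, rfl, rfl⟩ := hA
              exact hM.symm
            · simp only [if_neg ht] at hA hM
              rw [pvPush_eq] at hA
              have hrel' : pvRelF cx cy (v.insert (c1, c2))
                  ((c1, c2, 0) :: (fx, fy, fi + 1) :: frames)
                  ((((pvMoves cx cy c1 c2).reverse.drop 0).filter
                      (fun m => !(v.insert (c1, c2)).contains m))
                    ++ ((((pvMoves cx cy fx fy).reverse.drop (fi + 1)).filter
                        (fun m => !u.contains m)) ++ s')) :=
                pvRelF.cons c1 c2 0 (v.insert (c1, c2)) _ _ (by omega) (fun m hm => hm)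
                  (pvRelF.cons fx fy (fi + 1) u frames s' (by omega)
                    (fun m hm => pvContains_insert_mono v _ m (hu m hm))
                    (pvRelF_mono cx cy (fun m hm => pvContains_insert_mono v _ m hm) hrest))
              rw [List.drop_zero] at hrel'
              exact ih c1 c2 0 ((fx, fy, fi + 1) :: frames) (v.insert (c1, c2))
                ((c1, c2) :: p) _ fa res w q f' out hrel' hA hM

-- the state universe-- the state universe for nonnegative capacities
def pvUniv (cx cy : Int) : List (Int × Int) :=
  (List.range (cx + 1).toNat).flatMap
    (fun i : Nat => (List.range (cy + 1).toNat).map (fun j : Nat => ((i : Int), (j : Int))))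

theorem pvMem_univ (cx cy a b : Int) :
    (a, b) ∈ pvUniv cx cy ↔ 0 ≤ a ∧ a ≤ cx ∧ 0 ≤ b ∧ b ≤ cy := by
  constructor
  · intro h
    rcases List.mem_flatMap.mp h with ⟨i, hi, hmem⟩
    rcases List.mem_map.mp hmem with ⟨j, hj, hpair⟩
    rw [List.mem_range] at hi hj
    cases hpair
    omega
  · rintro ⟨ha, hax, hb, hby⟩
    refine List.mem_flatMap.mpr ⟨a.toNat, List.mem_range.mpr (by omega),
      List.mem_map.mpr ⟨b.toNat, List.mem_range.mpr (by omega), ?_⟩⟩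
    rw [Int.toNat_of_nonneg ha, Int.toNat_of_nonneg hb]

theorem pvLength_univ (cx cy : Int) : (pvUniv cx cy).length = pvSizeU cx cy := by
  simp [pvUniv, pvSizeU, List.length_flatMap, List.map_const']

def pvCount (cx cy : Int) (v : Std.HashSet (Int × Int)) : Nat :=
  ((pvUniv cx cy).filter (fun m => !v.contains m)).length

theorem pvCount_lt (cx cy : Int) (v : Std.HashSet (Int × Int)) (m : Int × Int)
    (hU : m ∈ pvUniv cx cy) (hv : v.contains m = false) :
    pvCount cx cy (v.insert m) < pvCount cx cy v := by
  unfold pvCount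
  have hsub : List.Sublist ((pvUniv cx cy).filter (fun a => !(v.insert m).contains a))
      ((pvUniv cx cy).filter (fun a => !v.contains a)) := by
    apply List.monotone_filter_right
    intro a ha
    simp only [Bool.not_eq_eq_eq_not, Bool.not_true, Std.HashSet.contains_insert,
      Bool.or_eq_false_iff] at ha ⊢
    exact ha.2
  refine lt_of_le_of_ne hsub.length_le ?_
  intro heq
  have heq2 := (List.Sublist.length_eq hsub).mp heq
  have hmem : m ∈ (pvUniv cx cy).filter (fun a => !v.contains a) := by
    simp [List.mem_filter, hU, hv]
  rw [← heq2] at hmem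
  have := (List.mem_filter.mp hmem).2
  rw [pvContains_insert_self] at this
  simp at this

theorem pvMoves_closed (cx cy x y : Int) (hx : 0 ≤ x) (hx' : x ≤ cx) (hy : 0 ≤ y) (hy' : y ≤ cy) :
    ∀ m ∈ pvMoves cx cy x y, m ∈ pvUniv cx cy := by
  intro m hm
  simp only [pvMoves, List.mem_cons, List.not_mem_nil, or_false] at hm
  rcases hm with rfl | rfl | rfl | rfl | rfl | rfl <;> (rw [pvMem_univ]; omega)

theorem pvSuffA (cx cy t : Int) :
    ∀ (fA : Nat) (stack : List (Int × Int)) (v : Std.HashSet (Int × Int)) (p : List (Int × Int)),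
      (∀ m ∈ stack, m ∈ pvUniv cx cy) →
      stack.length + 6 * pvCount cx cy v ≤ fA →
      pvLoopA cx cy t stack v p fA ≠ none := by
  intro fA
  induction fA with
  | zero =>
    intro stack v p hs hf
    obtain rfl : stack = [] := by
      cases stack with
      | nil => rfl
      | cons m rest => simp at hf
    simp [pvLoopA]
  | succ f ih =>
    intro stack v p hs hf
    match stack with
    | [] => simp [pvLoopA]
    | (x, y) :: rest =>
      have hxyU : (x, y) ∈ pvUniv cx cy := hs _ (List.mem_cons_self ..)
      by_cases hv : v.contains (x, y) = true
      · simp only [pvLoopA, if_pos hv]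
        apply ih rest v p (fun m hm => hs m (List.mem_cons_of_mem _ hm))
        simp only [List.length_cons] at hf
        omega
      · simp only [pvLoopA, if_neg hv]
        by_cases ht : x = t ∨ y = t
        · simp [ht]
        · simp only [if_neg ht]
          rw [pvPush_eq]
          set v' := v.insert (x, y) with hv'
          apply ih _ v' _ ?_ ?_
          · intro m hm
            rcases List.mem_append.mp hm with hm | hm
            · have : m ∈ (pvMoves cx cy x y).reverse := List.mem_of_mem_filter hm
              rw [List.mem_reverse] at this
              have h4 := (pvMem_univ cx cy x y).mp hxyU
              exact pvMoves_closed cx cy x y h4.1 h4.2.1 h4.2.2.1 h4.2.2.2 m this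
            · exact hs m (List.mem_cons_of_mem _ hm)
          · have hlen : (((pvMoves cx cy x y).reverse.filter
                (fun m => !v'.contains m)).length) ≤ 6 := by
              have := List.length_filter_le (fun m => !v'.contains m)
                ((pvMoves cx cy x y).reverse)
              simpa [pvMoves] using this
            have hvf : v.contains (x, y) = false := by
              cases h : v.contains (x, y)
              · rfl
              · exact absurd h hv
            have hcnt := pvCount_lt cx cy v (x, y) hxyU hvf
            rw [← hv'] at hcnt
            simp only [List.length_append, List.length_cons] at hf ⊢
            omega

-- fuel sufficiency for the machine: each iteration consumes one fuel;
-- Φ = 7·(unvisited states) + (7 − current cursor) + Σ over suspended frames of (7 − cursor)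
-- strictly decreases
def pvPot3 (fi : Nat) (frames : List (Int × Int × Nat)) : Nat :=
  (7 - fi) + (frames.map (fun fr => 7 - fr.2.2)).sum

def pvInvF (cx cy : Int) (frames : List (Int × Int × Nat)) : Prop :=
  ∀ fr ∈ frames, (fr.1, fr.2.1) ∈ pvUniv cx cy ∧ fr.2.2 ≤ 6

theorem pvSuffB3 (cx cy t : Int) : ∀ (f : Nat) (fx fy : Int) (fi : Nat)
    (frames : List (Int × Int × Nat)) (v : Std.HashSet (Int × Int)) (p : List (Int × Int)),
    (fx, fy) ∈ pvUniv cx cy → fi ≤ 6 → pvInvF cx cy frames →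
    7 * pvCount cx cy v + pvPot3 fi frames + 1 ≤ f →
    pvLoopB3 cx cy t f fx fy fi frames v p ≠ none := by
  intro f
  induction f with
  | zero =>
    intro fx fy fi frames v p _ _ _ hf
    omega
  | succ f ih =>
    intro fx fy fi frames v p hU hfi hinv hf
    by_cases h6 : fi = 6
    · subst h6
      simp only [pvLoopB3, reduceIte]
      cases frames with
      | nil => simp
      | cons fr fs =>
        obtain ⟨x, y, i⟩ := fr
        obtain ⟨hxyU, hi6⟩ := hinv _ (List.mem_cons_self ..)
        apply ih x y i fs v p hxyU hi6
          (fun fr hfr => hinv fr (List.mem_cons_of_mem _ hfr))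
        have : pvPot3 6 ((x, y, i) :: fs) = 1 + pvPot3 i fs := by
          simp [pvPot3]
        omega
    · have hlt : fi < 6 := by omega
      simp only [pvLoopB3, if_neg h6]
      have hcU : pvMove cx cy fx fy fi ∈ pvUniv cx cy := by
        have h4 := (pvMem_univ cx cy fx fy).mp hU
        exact pvMoves_closed cx cy fx fy h4.1 h4.2.1 h4.2.2.1 h4.2.2.2 _
          (pvMove_mem cx cy fx fy fi hlt)
      by_cases hv : v.contains (pvMove cx cy fx fy fi) = true
      · rw [if_pos hv]
        apply ih fx fy (fi + 1) frames v p hU (by omega) hinv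
        have : pvPot3 (fi + 1) frames + 1 = pvPot3 fi frames := by
          simp [pvPot3]
          omega
        omega
      · rw [if_neg hv]
        by_cases ht : (pvMove cx cy fx fy fi).1 = t ∨ (pvMove cx cy fx fy fi).2 = t
        · simp [ht]
        · simp only [if_neg ht]
          have hvf : v.contains (pvMove cx cy fx fy fi) = false := by
            cases h : v.contains (pvMove cx cy fx fy fi)
            · rfl
            · exact absurd h hv
          have hcnt := pvCount_lt cx cy v _ hcU hvf
          apply ih _ _ 0 _ _ _ hcU (by omega)
          · intro fr hfr
            rcases List.mem_cons.mp hfr with rfl | hfr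
            · exact ⟨hU, by show fi + 1 ≤ 6; omega⟩
            · exact hinv fr hfr
          · have h1 : pvPot3 0 ((fx, fy, fi + 1) :: frames) = 7 + (7 - (fi + 1))
                + (frames.map (fun fr => 7 - fr.2.2)).sum := by
              simp [pvPot3]
              omega
            have h2 : pvPot3 fi frames = (7 - fi)
                + (frames.map (fun fr => 7 - fr.2.2)).sum := rfl
            omega

theorem pvCount_empty (cx cy : Int) : pvCount cx cy ∅ = pvSizeU cx cy := by
  rw [← pvLength_univ]
  unfold pvCount
  congr 1
  apply List.filter_eq_self.mpr
  intro m _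
  simp [Std.HashSet.contains_empty]

-- ===== VERDICT (by name: the statement is the Claim_ definition above) =====
theorem dfs_spec : Claim_equal_dfs := by
  unfold Claim_equal_dfs
  intro cx cy t _ hpre
  unfold Spec_dfs dfs dfs_alt
  by_cases ht0 : t = 0
  · subst ht0
    have hA1 : pvStepA cx cy 0 (.inr (6 * pvSizeU cx cy + 1, [(0, 0)], ∅, []))
        = .inl (some [(0, 0)], Std.HashSet.insert ∅ (0, 0), [(0, 0)]) := by
      simp [pvStepA, Std.HashSet.contains_empty]
    rw [pvRun_eq, pvIter_hit (pvStepA cx cy 0) (fun s => s.isLeft) _ rfl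
        (by rw [hA1]; rfl) _ (Nat.two_pow_pos _), hA1, if_pos rfl]
  · have hcap : 0 ≤ cx ∧ 0 ≤ cy := by
      rcases hpre with h | h
      · exact h
      · exact absurd h ht0
    obtain ⟨hx, hy⟩ := hcap
    have h00 : ((0 : Int), (0 : Int)) ∈ pvUniv cx cy := by
      rw [pvMem_univ]; omega
    have hv0 : (∅ : Std.HashSet (Int × Int)).contains ((0 : Int), (0 : Int)) = false := by
      simp [Std.HashSet.contains_empty]
    have hA := pvSuffA cx cy t (6 * pvSizeU cx cy + 1) [(0, 0)] ∅ []
      (by intro m hm; simp only [List.mem_singleton] at hm; subst hm; exact h00)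
      (by rw [pvCount_empty]; simp; omega)
    rcases hAs : pvLoopA cx cy t [(0, 0)] ∅ [] (6 * pvSizeU cx cy + 1) with
      _ | ⟨res, w, q, f'⟩
    · exact absurd hAs hA
    · -- unfold A's first iteration: it enters (0, 0) and pushes its filtered moves
      have hAs2 : pvLoopA cx cy t
          (((pvMoves cx cy 0 0).reverse.filter
              (fun m => !(Std.HashSet.insert (∅ : Std.HashSet (Int × Int)) ((0 : Int), (0 : Int))).contains m)) ++ [])
          (Std.HashSet.insert ∅ (0, 0)) [(0, 0)] (6 * pvSizeU cx cy)
          = some (res, w, q, f') := by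
        have hne : ¬((0 : Int) = t ∨ (0 : Int) = t) := by
          intro h
          rcases h with h | h <;> exact ht0 h.symm
        rw [show (6 : Nat) * pvSizeU cx cy + 1 = (6 * pvSizeU cx cy) + 1 from rfl] at hAs
        simp only [pvLoopA, hv0, Bool.false_eq_true, if_false, if_neg hne] at hAs
        rw [pvPush_eq] at hAs
        exact hAs
      have hcnt0 : pvCount cx cy (Std.HashSet.insert ∅ ((0 : Int), (0 : Int)))
          < pvSizeU cx cy := by
        have := pvCount_lt cx cy ∅ (0, 0) h00 hv0
        rw [pvCount_empty] at this
        exact this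
      have hB := pvSuffB3 cx cy t (7 * pvSizeU cx cy + 8) 0 0 0 []
        (Std.HashSet.insert ∅ (0, 0)) [(0, 0)] h00 (by omega)
        (by intro fr hfr; simp at hfr)
        (by have h2 : pvPot3 0 ([] : List (Int × Int × Nat)) = 7 := rfl
            omega)
      rcases hBs : pvLoopB3 cx cy t (7 * pvSizeU cx cy + 8) 0 0 0 []
          (Std.HashSet.insert ∅ (0, 0)) [(0, 0)] with _ | out
      · exact absurd hBs hB
      · have hrel : pvRelF cx cy (Std.HashSet.insert ∅ ((0 : Int), (0 : Int)))
            [((0 : Int), (0 : Int), (0 : Nat))]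
            (((pvMoves cx cy 0 0).reverse.filter
                (fun m => !(Std.HashSet.insert (∅ : Std.HashSet (Int × Int)) ((0 : Int), (0 : Int))).contains m)) ++ []) := by
          have h := pvRelF.cons (cx := cx) (cy := cy) 0 0 0
            (Std.HashSet.insert ∅ ((0 : Int), (0 : Int))) [] []
            (by omega) (fun m hm => hm) pvRelF.nil
          rwa [List.drop_zero] at h
        have hout := pvBridge3 cx cy t (7 * pvSizeU cx cy + 8) 0 0 0 []
          (Std.HashSet.insert ∅ (0, 0)) [(0, 0)] _ (6 * pvSizeU cx cy) res w q f' out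
          hrel hAs2 hBs
        have hRA : pvRun (pvStepA cx cy t) (fun s => s.isLeft)
            (Nat.log2 (6 * pvSizeU cx cy + 1 + 1) + 1)
            (.inr (6 * pvSizeU cx cy + 1, [(0, 0)], ∅, [])) = .inl (res, w, q) := by
          rw [pvRun_eq]
          exact pvIterA_of_some cx cy t _ _ _ _ _ res w q f' hAs (pvTwoPow_ge _)
        have hRB : pvRun (pvStepB cx cy t) (fun s => s.isLeft)
            (Nat.log2 (7 * pvSizeU cx cy + 8 + 1) + 1)
            (.inr (7 * pvSizeU cx cy + 8, 0, 0, 0, [],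
              Std.HashSet.insert ∅ (0, 0), [(0, 0)])) = .inl out := by
          rw [pvRun_eq]
          exact pvIterB3_of_some cx cy t _ _ _ _ _ _ _ _ out hBs (pvTwoPow_ge _)
        rw [hRA, if_neg (fun h => ht0 h.symm), hRB, hout]
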